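-- pv_equiv track=rewrite | github.com/gribskov/biocomputing | dotplot/diagonal.py | scoreMinMax
-- ===== SOURCE A (Python) =====
-- def scoreMinMax(score):
--     """-----------------------------------------------------------------------------------------
--     Returns the first and last non-zero positions in a list of scores.  Use to get ranges for
--     score histograms
--
--     :param score: list
--     :return: int, int
--     -----------------------------------------------------------------------------------------"""
--     scoremin = None
--     scoremax = None
--     for i in range(len(score)):
--         if score[i] > 0:
--             if scoremin is None:
--                 scoremin = i
--             scoremax = i
--
--     return scoremin, scoremax
-- ===== SOURCE B (Python) =====
-- def scoreMinMax(score):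
--     """Two single-purpose scans: first positive index scanning forward,
--     first positive index scanning backward."""
--     n = len(score)
--     scoremin = next((i for i in range(n) if score[i] > 0), None)
--     scoremax = next((i for i in range(n - 1, -1, -1) if score[i] > 0), None)
--     return scoremin, scoremax
-- ===== Notes on version B (the rewrite author's own statement) =====
-- stated objective: simpler
-- what changed: Replaces the single combined pass with stateful min/max tracking by two separate stateless scans: a forward scan returning the first positive index and a backward scan returning the last one.
import Mathlib
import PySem

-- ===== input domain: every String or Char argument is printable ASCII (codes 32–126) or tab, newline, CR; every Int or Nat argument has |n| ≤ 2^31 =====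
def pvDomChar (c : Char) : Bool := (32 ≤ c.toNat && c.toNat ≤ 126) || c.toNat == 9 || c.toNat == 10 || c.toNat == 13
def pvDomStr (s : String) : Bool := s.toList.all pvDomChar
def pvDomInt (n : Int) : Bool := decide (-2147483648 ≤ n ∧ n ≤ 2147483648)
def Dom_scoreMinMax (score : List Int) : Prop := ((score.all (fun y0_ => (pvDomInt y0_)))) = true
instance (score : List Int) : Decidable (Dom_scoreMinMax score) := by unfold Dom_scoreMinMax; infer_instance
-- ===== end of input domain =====

-- B replaces A's single stateful min/max pass by two separate stateless scans (forward for the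
-- first positive index, backward for the last); objective: simpler decomposition, same O(n) cost.

-- ===== PORT A =====
-- one pass over i in range(len(score)), carrying (scoremin, scoremax)
def scoreMinMax (score : List Int) : Option Int × Option Int :=
  (PySem.List.pyRange 0 (PySem.List.len score) 1).foldl
    (fun (st : Option Int × Option Int) i =>
      if PySem.List.pyGetD score i 0 > 0 then
        ((if st.1 = none then some i else st.1), some i)
      else st)
    (none, none)

-- ===== PORT B =====
-- 'next((i for i in idxs if score[i] > 0), None)': first index in idxs whose score is positive
def firstPosIdx (score : List Int) (idxs : List Int) : Option Int :=
  match idxs with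
  | [] => none
  | i :: rest => if PySem.List.pyGetD score i 0 > 0 then some i else firstPosIdx score rest

def scoreMinMax_alt (score : List Int) : Option Int × Option Int :=
  (firstPosIdx score (PySem.List.pyRange 0 (PySem.List.len score) 1),
   firstPosIdx score (PySem.List.pyRange (PySem.List.len score - 1) (-1) (-1)))

-- ===== PRECONDITION & SPEC =====
def Spec_scoreMinMax (score : List Int) (out : Option Int × Option Int) : Prop := out = scoreMinMax_alt score
instance (score : List Int) (out : Option Int × Option Int) : Decidable (Spec_scoreMinMax score out) := by unfold Spec_scoreMinMax; infer_instance

-- ===== CLAIM (what is proved, stated in full; the proofs are below) =====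
def Claim_equal_scoreMinMax : Prop := ∀ (score : List Int), Dom_scoreMinMax score → Spec_scoreMinMax score (scoreMinMax score)

-- ===== LEMMAS AND PROOFS =====

theorem firstPosIdx_append (score l1 l2 : List Int) :
    firstPosIdx score (l1 ++ l2) =
      match firstPosIdx score l1 with
      | some j => some j
      | none => firstPosIdx score l2 := by
  induction l1 with
  | nil => simp [firstPosIdx]
  | cons i rest ih =>
      simp only [List.cons_append, firstPosIdx]
      split_ifs with h
      · rfl
      · exact ih

theorem scoreMinMax_main (score : List Int) (k : Nat) :
    (PySem.List.pyRange 0 (k : Int) 1).foldl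
      (fun (st : Option Int × Option Int) i =>
        if PySem.List.pyGetD score i 0 > 0 then
          ((if st.1 = none then some i else st.1), some i)
        else st)
      (none, none)
    = (firstPosIdx score (PySem.List.pyRange 0 (k : Int) 1),
       firstPosIdx score (PySem.List.pyRange ((k : Int) - 1) (-1) (-1))) := by
  induction k with
  | zero =>
      rw [PySem.List.pyRange_one_eq_nil (by norm_num),
          PySem.List.pyRange_neg_one_eq_nil (by norm_num)]
      simp [firstPosIdx]
  | succ k ih =>
      have hcast : ((k + 1 : Nat) : Int) = (k : Int) + 1 := by push_cast; ring
      rw [hcast, PySem.List.pyRange_one_succ_right (by omega),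
          List.foldl_append, ih]
      have hbwd : PySem.List.pyRange ((k : Int) + 1 - 1) (-1) (-1)
          = (k : Int) :: PySem.List.pyRange ((k : Int) - 1) (-1) (-1) := by
        have : ((k : Int) + 1 - 1) = (k : Int) := by ring
        rw [this, PySem.List.pyRange_neg_one_cons (by omega)]
      rw [hbwd, firstPosIdx_append]
      simp only [List.foldl_cons, List.foldl_nil, firstPosIdx]
      by_cases hp : PySem.List.pyGetD score (k : Int) 0 > 0
      all_goals
        simp only [hp, if_pos, if_false]
        cases hf : firstPosIdx score (PySem.List.pyRange 0 (k : Int) 1) with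
        | none => simp
        | some j => simp

-- ===== VERDICT (by name: the statement is the Claim_ definition above) =====
theorem scoreMinMax_spec : Claim_equal_scoreMinMax := by
  intro score _
  unfold Spec_scoreMinMax scoreMinMax scoreMinMax_alt
  have h := scoreMinMax_main score score.length
  simpa [PySem.List.len] using h
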